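-- pv_equiv track=rewrite | github.com/ingrid-nagell/IBE152-intro-programmering-h2024 | oblig4/mittskall.py | tegnapenboks
-- ===== SOURCE A (Python) =====
-- def tegnapenboks(tegn: str, høyde: int, bredde: int) -> str:
--     """Boksen tegnes av tegnåpenboks (tegn, høyde, bredde).Med argumentene ("+", 4, 4) får vi:
--         ++++
--         +  +
--         +  +
--         ++++
--     """
--     boks = ""
--     for i in range(0, høyde):
--         if i==0 or i == høyde-1:
--             boks += "\n"+f"{tegn}"*bredde
--         else:
--             boks += "\n"+f"{tegn}"+" "*(bredde-2)+f"{tegn}"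
--     return(boks)
-- ===== SOURCE B (Python) =====
-- def tegnapenboks(tegn: str, høyde: int, bredde: int) -> str:
--     if høyde < 1:
--         return ""
--     top = "\n" + tegn * bredde
--     if høyde == 1:
--         return top
--     mid = "\n" + tegn + " " * (bredde - 2) + tegn
--     return top + mid * (høyde - 2) + top
-- ===== Notes on version B (the rewrite author's own statement) =====
-- stated objective: simpler
-- what changed: Replaces the per-row loop with per-row branching by computing the two distinct row strings once and assembling the box as top + mid*(h-2) + top via string repetition.
import Mathlib
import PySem

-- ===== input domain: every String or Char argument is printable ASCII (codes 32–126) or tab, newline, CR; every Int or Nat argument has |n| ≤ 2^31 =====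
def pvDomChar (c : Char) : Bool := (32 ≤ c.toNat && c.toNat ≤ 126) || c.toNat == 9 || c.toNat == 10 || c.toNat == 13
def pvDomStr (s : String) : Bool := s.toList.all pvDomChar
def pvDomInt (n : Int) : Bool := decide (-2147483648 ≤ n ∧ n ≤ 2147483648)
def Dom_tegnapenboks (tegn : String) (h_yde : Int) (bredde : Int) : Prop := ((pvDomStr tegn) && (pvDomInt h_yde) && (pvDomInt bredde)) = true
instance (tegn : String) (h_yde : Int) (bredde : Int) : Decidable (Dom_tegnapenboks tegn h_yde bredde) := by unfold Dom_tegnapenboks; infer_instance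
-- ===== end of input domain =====

-- B computes the two distinct row strings once and assembles the box as top + mid*(h-2) + top
-- by string repetition instead of looping over every row index (objective: simpler).


-- ===== PORT A =====
-- the loop of A over range(0, høyde), on code points
def tegnapenboksRows (tegn : List Char) (h_yde : Int) (bredde : Int) : List Char :=
  (PySem.List.pyRange 0 h_yde 1).foldl (fun boks i =>
    if i = 0 ∨ i = h_yde - 1 then
      boks ++ '\n' :: PySem.List.pyRepeat tegn bredde
    else
      boks ++ '\n' :: (tegn ++ PySem.List.pyRepeat [' '] (bredde - 2) ++ tegn)) []

def tegnapenboks (tegn : String) (h_yde : Int) (bredde : Int) : String :=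
  String.ofList (tegnapenboksRows tegn.toList h_yde bredde)

-- ===== PORT B =====
def tegnapenboks_alt (tegn : String) (h_yde : Int) (bredde : Int) : String :=
  if h_yde < 1 then ""
  else
    let top : List Char := '\n' :: PySem.List.pyRepeat tegn.toList bredde
    if h_yde = 1 then String.ofList top
    else
      let mid : List Char := '\n' :: (tegn.toList ++ PySem.List.pyRepeat [' '] (bredde - 2) ++ tegn.toList)
      String.ofList (top ++ PySem.List.pyRepeat mid (h_yde - 2) ++ top)

-- ===== PRECONDITION & SPEC =====
def Spec_tegnapenboks (tegn : String) (h_yde : Int) (bredde : Int) (out : String) : Prop := out = tegnapenboks_alt tegn h_yde bredde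
instance (tegn : String) (h_yde : Int) (bredde : Int) (out : String) : Decidable (Spec_tegnapenboks tegn h_yde bredde out) := by unfold Spec_tegnapenboks; infer_instance

-- ===== CLAIM (what is proved, stated in full; the proofs are below) =====
def Claim_equal_tegnapenboks : Prop := ∀ (tegn : String) (h_yde : Int) (bredde : Int), Dom_tegnapenboks tegn h_yde bredde → Spec_tegnapenboks tegn h_yde bredde (tegnapenboks tegn h_yde bredde)

-- ===== LEMMAS AND PROOFS =====

-- appending one more copy on the right of a repetition
theorem pyRepeat_succ_right {α : Type} (xs : List α) (n : Nat) :
    PySem.List.pyRepeat xs (n : Int) ++ xs = PySem.List.pyRepeat xs ((n : Int) + 1) := by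
  have h1 : ((n : Int)).toNat = n := by omega
  have h2 : ((n : Int) + 1).toNat = n + 1 := by omega
  simp [PySem.List.pyRepeat, h1, h2, List.replicate_succ']

-- the first k rows of A's loop (1 ≤ k ≤ h-1): one top row then k-1 middle rows
theorem rows_prefix (tegn : List Char) (h_yde : Int) (bredde : Int) (k : Nat)
    (hk1 : 1 ≤ k) (hk2 : (k : Int) ≤ h_yde - 1) (boks : List Char) :
    (PySem.List.pyRange 0 (k : Int) 1).foldl (fun boks i =>
      if i = 0 ∨ i = h_yde - 1 then
        boks ++ '\n' :: PySem.List.pyRepeat tegn bredde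
      else
        boks ++ '\n' :: (tegn ++ PySem.List.pyRepeat [' '] (bredde - 2) ++ tegn)) boks
    = boks ++ ('\n' :: PySem.List.pyRepeat tegn bredde)
        ++ PySem.List.pyRepeat ('\n' :: (tegn ++ PySem.List.pyRepeat [' '] (bredde - 2) ++ tegn)) ((k : Int) - 1) := by
  induction k generalizing boks with
  | zero => omega
  | succ j ih =>
    by_cases hj : j = 0
    · subst hj
      have h01 : ((0 + 1 : Nat) : Int) = 1 := by norm_num
      rw [h01, show PySem.List.pyRange 0 1 1 = [0] from by
        simpa using PySem.List.pyRange_one_singleton (a := (0 : Int))]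
      simp [PySem.List.pyRepeat]
    · have hj1 : 1 ≤ j := Nat.one_le_iff_ne_zero.mpr hj
      have hsplit : PySem.List.pyRange 0 ((j + 1 : Nat) : Int) 1
          = PySem.List.pyRange 0 (j : Int) 1 ++ [(j : Int)] := by
        have : ((j + 1 : Nat) : Int) = (j : Int) + 1 := by push_cast; ring
        rw [this]
        exact PySem.List.pyRange_one_succ_right (by positivity)
      rw [hsplit, List.foldl_append, ih hj1 (by push_cast at hk2 ⊢; omega)]
      have hne0 : ¬ ((j : Int) = 0) := by exact_mod_cast hj
      have hneh : ¬ ((j : Int) = h_yde - 1) := by push_cast at hk2; omega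
      simp only [List.foldl_cons, List.foldl_nil, hne0, hneh, or_self, if_false]
      have hstep : PySem.List.pyRepeat ('\n' :: (tegn ++ PySem.List.pyRepeat [' '] (bredde - 2) ++ tegn)) ((j : Int) - 1)
          ++ ('\n' :: (tegn ++ PySem.List.pyRepeat [' '] (bredde - 2) ++ tegn))
          = PySem.List.pyRepeat ('\n' :: (tegn ++ PySem.List.pyRepeat [' '] (bredde - 2) ++ tegn)) (((j + 1 : Nat) : Int) - 1) := by
        have h := pyRepeat_succ_right ('\n' :: (tegn ++ PySem.List.pyRepeat [' '] (bredde - 2) ++ tegn)) (j - 1)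
        have hcast : ((j - 1 : Nat) : Int) = (j : Int) - 1 := by omega
        rw [hcast] at h
        rw [h]
        congr 1
        push_cast
        ring
      simp only [List.append_assoc] at hstep ⊢
      rw [hstep]

theorem rows_closed (tegn : List Char) (h_yde : Int) (bredde : Int) :
    tegnapenboksRows tegn h_yde bredde
    = (if h_yde < 1 then []
       else if h_yde = 1 then '\n' :: PySem.List.pyRepeat tegn bredde
       else ('\n' :: PySem.List.pyRepeat tegn bredde)
            ++ PySem.List.pyRepeat ('\n' :: (tegn ++ PySem.List.pyRepeat [' '] (bredde - 2) ++ tegn)) (h_yde - 2)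
            ++ ('\n' :: PySem.List.pyRepeat tegn bredde)) := by
  unfold tegnapenboksRows
  by_cases h0 : h_yde < 1
  · rw [PySem.List.pyRange_one_eq_nil (by omega)]
    simp [h0]
  · by_cases h1 : h_yde = 1
    · subst h1
      rw [show PySem.List.pyRange 0 1 1 = [0] from by
        simpa using PySem.List.pyRange_one_singleton (a := (0 : Int))]
      simp
    · -- h_yde ≥ 2
      have h2 : 2 ≤ h_yde := by omega
      have hsplit : PySem.List.pyRange 0 h_yde 1
          = PySem.List.pyRange 0 (h_yde - 1) 1 ++ [h_yde - 1] := by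
        have h := PySem.List.pyRange_one_succ_right (a := (0 : Int)) (b := h_yde - 1) (by omega)
        rw [show h_yde - 1 + 1 = h_yde from by ring] at h
        exact h
      rw [hsplit, List.foldl_append]
      have hk : ((h_yde - 1).toNat : Int) = h_yde - 1 := by omega
      rw [show PySem.List.pyRange 0 (h_yde - 1) 1 = PySem.List.pyRange 0 ((h_yde - 1).toNat : Int) 1 from by rw [hk]]
      rw [rows_prefix tegn h_yde bredde (h_yde - 1).toNat (by omega) (by omega) []]
      rw [hk]
      simp only [List.foldl_cons, List.foldl_nil, or_true, if_true]
      simp only [if_neg h0, if_neg h1]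
      have : h_yde - 1 - 1 = h_yde - 2 := by ring
      rw [this]
      simp

-- ===== VERDICT (by name: the statement is the Claim_ definition above) =====
theorem tegnapenboks_spec : Claim_equal_tegnapenboks := by
  intro tegn h_yde bredde _
  unfold Spec_tegnapenboks tegnapenboks tegnapenboks_alt
  rw [rows_closed]
  by_cases h0 : h_yde < 1
  · simp [h0]
  · by_cases h1 : h_yde = 1
    · simp [h1]
    · simp [h0, h1]
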